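-- pv_equiv track=rewrite | github.com/NJJeus/AliMarko | scripts/analyze_seq_hmm.py | _translate_non_stop
-- ===== SOURCE A (Python) =====
-- from typing import List, Dict, Tuple, Optional, Set
--
-- def _translate_non_stop(seq: str, genetic_code: Dict[str, str], threshold: int, info: str) -> List[Tuple[str, str]]:
--     """Translate the entire sequence, including stop codons, and attach metadata."""
--     proteins = []
--     for skew in [0, 1, 2]:
--         protein = []
--         seq_trunc = seq[skew:]
--         for i in range(0, (len(seq_trunc) // 3) * 3, 3):
--             aa = genetic_code.get(seq_trunc[i:i + 3], 'X')
--             protein.append(aa)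
--         proteins.append(("".join(protein), f'{info};skew_{skew};'))
--     return proteins
-- ===== SOURCE B (Python) =====
-- from typing import List, Dict, Tuple
--
-- def _translate_non_stop(seq: str, genetic_code: Dict[str, str], threshold: int, info: str) -> List[Tuple[str, str]]:
--     """Translate the entire sequence, including stop codons, and attach metadata."""
--     buckets = ([], [], [])
--     for i in range(len(seq) - 2):
--         aa = genetic_code.get(seq[i:i + 3], 'X')
--         buckets[i % 3].append(aa)
--     return [("".join(buckets[s]), f'{info};skew_{s};') for s in (0, 1, 2)]
-- ===== Notes on version B (the rewrite author's own statement) =====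
-- stated objective: alternative
-- what changed: Replaces the three separate frame passes (each truncating the sequence and stepping by 3) with one linear scan over all codon start positions that routes each translated codon into buckets[i % 3].
import Mathlib
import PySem

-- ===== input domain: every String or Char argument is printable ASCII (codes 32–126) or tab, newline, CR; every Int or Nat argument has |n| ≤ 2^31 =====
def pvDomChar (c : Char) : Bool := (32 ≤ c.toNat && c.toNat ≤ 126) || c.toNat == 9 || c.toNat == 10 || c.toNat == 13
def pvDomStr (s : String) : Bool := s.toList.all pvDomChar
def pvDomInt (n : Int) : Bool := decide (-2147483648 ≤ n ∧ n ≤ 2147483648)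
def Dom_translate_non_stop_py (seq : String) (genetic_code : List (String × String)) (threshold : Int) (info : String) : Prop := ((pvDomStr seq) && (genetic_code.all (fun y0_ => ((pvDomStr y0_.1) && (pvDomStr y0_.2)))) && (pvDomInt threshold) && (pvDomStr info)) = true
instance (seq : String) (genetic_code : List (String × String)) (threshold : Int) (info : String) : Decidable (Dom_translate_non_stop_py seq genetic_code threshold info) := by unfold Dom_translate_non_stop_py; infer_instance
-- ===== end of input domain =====

-- B replaces A's three separate frame passes (truncate, then step by 3) with one linear scan
-- over all codon start positions that routes each translated codon into the bucket i % 3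
-- (objective: alternative — same asymptotic cost, a genuinely different traversal).

-- f'{info};skew_{skew};' (identical in both Pythons)
def pvFstr (info : String) (skew : Int) : String :=
  PySem.Str.join "" [info, ";skew_", PySem.Int.toStr skew, ";"]

-- ===== PORT A =====
def translate_non_stop_py (seq : String) (genetic_code : List (String × String)) (threshold : Int) (info : String) : List (String × String) :=
  ([0, 1, 2] : List Int).foldl (fun proteins skew =>
    let seq_trunc := PySem.Str.slice seq (some skew) none
    let protein := (PySem.List.pyRange 0 ((PySem.Int.floordiv (PySem.Str.len seq_trunc) 3) * 3) 3).foldl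
      (fun protein i =>
        let aa := PySem.Dict.getD (PySem.Dict.mk genetic_code) (PySem.Str.slice seq_trunc (some i) (some (i + 3))) "X"
        protein ++ [aa]) []
    proteins ++ [(PySem.Str.join "" protein, pvFstr info skew)]) []

-- ===== PORT B =====
def translate_non_stop_py_alt (seq : String) (genetic_code : List (String × String)) (threshold : Int) (info : String) : List (String × String) :=
  let bs := (PySem.List.pyRange 0 (PySem.Str.len seq - 2) 1).foldl
    (fun (b : List String × List String × List String) i =>
      let aa := PySem.Dict.getD (PySem.Dict.mk genetic_code) (PySem.Str.slice seq (some i) (some (i + 3))) "X"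
      if PySem.Int.mod i 3 == 0 then (b.1 ++ [aa], b.2.1, b.2.2)
      else if PySem.Int.mod i 3 == 1 then (b.1, b.2.1 ++ [aa], b.2.2)
      else (b.1, b.2.1, b.2.2 ++ [aa]))
    ([], [], [])
  [(PySem.Str.join "" bs.1, pvFstr info 0),
   (PySem.Str.join "" bs.2.1, pvFstr info 1),
   (PySem.Str.join "" bs.2.2, pvFstr info 2)]

-- ===== PRECONDITION & SPEC =====
def Spec_translate_non_stop_py (seq : String) (genetic_code : List (String × String)) (threshold : Int) (info : String) (out : List (String × String)) : Prop := out = translate_non_stop_py_alt seq genetic_code threshold info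
instance (seq : String) (genetic_code : List (String × String)) (threshold : Int) (info : String) (out : List (String × String)) : Decidable (Spec_translate_non_stop_py seq genetic_code threshold info out) := by unfold Spec_translate_non_stop_py; infer_instance

-- ===== CLAIM (what is proved, stated in full; the proofs are below) =====
def Claim_equal_translate_non_stop_py : Prop := ∀ (seq : String) (genetic_code : List (String × String)) (threshold : Int) (info : String), Dom_translate_non_stop_py seq genetic_code threshold info → Spec_translate_non_stop_py seq genetic_code threshold info (translate_non_stop_py seq genetic_code threshold info)

-- ===== LEMMAS AND PROOFS =====

-- Python's % with divisor 3 is Lean's Int.emod with divisor 3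
theorem pvModEq (i : Int) : PySem.Int.mod i 3 = i % 3 := by
  simp [PySem.Int.mod]
  rw [Int.fmod_eq_emod_of_nonneg _ (by norm_num)]

-- B's loop body, named (defeq to the lambda in the port, used to state the invariant)
def pvStep (g : Int → String) (b : List String × List String × List String) (i : Int) :
    List String × List String × List String :=
  let aa := g i
  if i % 3 == 0 then (b.1 ++ [aa], b.2.1, b.2.2)
  else if i % 3 == 1 then (b.1, b.2.1 ++ [aa], b.2.2)
  else (b.1, b.2.1, b.2.2 ++ [aa])

-- invariant of B's single pass: each bucket collects exactly its residue class, in order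
theorem pvRoute (g : Int → String) (l : List Int) (b0 b1 b2 : List String) :
    l.foldl (pvStep g) (b0, b1, b2)
    = (b0 ++ (l.filter (fun i => i % 3 == 0)).map g,
       b1 ++ (l.filter (fun i => i % 3 == 1)).map g,
       b2 ++ (l.filter (fun i => !(i % 3 == 0) && !(i % 3 == 1))).map g) := by
  induction l generalizing b0 b1 b2 with
  | nil => simp
  | cons x xs ih =>
    rw [List.foldl_cons]
    by_cases h0 : (3:Int) ∣ x
    · have h1 : ¬ x % 3 = 1 := by omega
      have hs : pvStep g (b0, b1, b2) x = (b0 ++ [g x], b1, b2) := by simp [pvStep, h0]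
      rw [hs, ih]; simp [h0, h1, List.filter_cons]
    · by_cases h1 : x % 3 = 1
      · have hs : pvStep g (b0, b1, b2) x = (b0, b1 ++ [g x], b2) := by simp [pvStep, h0, h1]
        rw [hs, ih]; simp [h0, h1, List.filter_cons]
      · have hs : pvStep g (b0, b1, b2) x = (b0, b1, b2 ++ [g x]) := by simp [pvStep, h0, h1]
        rw [hs, ih]; simp [h0, h1, List.filter_cons]

-- since i % 3 ∈ {0,1,2}, B's final else-branch is exactly residue 2
theorem pvCond2 : (fun i : Int => !(i % 3 == 0) && !(i % 3 == 1)) = (fun i : Int => i % 3 == 2) := by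
  funext i
  rcases (show i % 3 = 0 ∨ i % 3 = 1 ∨ i % 3 = 2 by omega) with h | h | h <;> simp [h]

-- which Nat indices below m are ≡ s (mod 3), in order
theorem pvFilterRange (s m : Nat) (hs : s < 3) :
    (List.range m).filter (fun k => k % 3 == s)
      = (List.range ((m - s + 2) / 3)).map (fun j => s + 3 * j) := by
  induction m with
  | zero =>
    have h0 : (0 - s + 2) / 3 = 0 := by omega
    rw [h0]; simp
  | succ m ih =>
    rw [List.range_succ, List.filter_append, ih]
    by_cases h : m % 3 = s
    · have hc : (m + 1 - s + 2) / 3 = (m - s + 2) / 3 + 1 := by omega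
      have hm : s + 3 * ((m - s + 2) / 3) = m := by omega
      simp [h, hc, List.range_succ, hm]
    · have hc : (m + 1 - s + 2) / 3 = (m - s + 2) / 3 := by omega
      simp [h, hc]

theorem pvFloordivCast (a : Nat) : PySem.Int.floordiv (a : Int) 3 = ((a / 3 : Nat) : Int) := by
  simp [PySem.Int.floordiv, Int.fdiv_eq_ediv]

theorem pvRange3 (q : Nat) : PySem.List.pyRange 0 ((q : Int) * 3) 3
    = (List.range q).map (fun k : Nat => ((3 * k : Nat) : Int)) := by
  rw [PySem.List.pyRange_of_pos _ _ (by norm_num)]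
  have h : (if (0:Int) < (q:Int) * 3 then (((q:Int) * 3 - 0 + 3 - 1) / 3).toNat else 0) = q := by
    split_ifs with h <;> omega
  rw [h]; simp

-- the frame-s codons of A (truncate then step by 3) are exactly B's residue-s positions
theorem pvFrame (seq : String) (d : PySem.Dict String String) (s : Nat) (hs : s < 3) :
    (PySem.List.pyRange 0 ((PySem.Int.floordiv (PySem.Str.len (PySem.Str.slice seq (some (s:Int)) none)) 3) * 3) 3).map
      (fun i => PySem.Dict.getD d (PySem.Str.slice (PySem.Str.slice seq (some (s:Int)) none) (some i) (some (i+3))) "X")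
    = ((PySem.List.pyRange 0 (PySem.Str.len seq - 2) 1).filter (fun i => i % 3 == (s:Int))).map
      (fun i => PySem.Dict.getD d (PySem.Str.slice seq (some i) (some (i+3))) "X") := by
  have hlen : PySem.Str.len (PySem.Str.slice seq (some (s:Int)) none) = ((seq.toList.length - s : Nat) : Int) := by
    simp [PySem.Str.len_eq, PySem.Str.toList_slice, PySem.List.slice_from_natCast]
  rw [hlen, pvFloordivCast, pvRange3]
  rw [PySem.Str.len_eq]
  have hr1 : PySem.List.pyRange 0 ((seq.toList.length : Int) - 2) 1
      = (List.range (seq.toList.length - 2)).map (fun k : Nat => (k : Int)) := by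
    rw [PySem.List.pyRange_one]
    have h : (((seq.toList.length : Int) - 2) - 0).toNat = seq.toList.length - 2 := by omega
    rw [h]; simp
  rw [hr1, List.filter_map]
  have hcond : ((fun i : Int => i % 3 == (s:Int)) ∘ (fun k : Nat => (k : Int))) = (fun k : Nat => k % 3 == s) := by
    funext k
    simp only [Function.comp]
    rw [show ((k:Int) % 3) = ((k % 3 : Nat) : Int) by push_cast; ring]
    by_cases h : k % 3 = s
    · simp [h]
    · simp [h]
      exact fun hc => h (Nat.cast_inj.mp hc)
  rw [hcond, pvFilterRange _ _ hs]
  have hq : (seq.toList.length - 2 - s + 2) / 3 = (seq.toList.length - s) / 3 := by omega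
  rw [hq]
  simp only [List.map_map]
  apply List.map_congr_left
  intro k hk
  simp only [Function.comp]
  have hkey : PySem.Str.slice (PySem.Str.slice seq (some (s:Int)) none) (some ((3*k : Nat) : Int)) (some (((3*k : Nat) : Int)+3))
      = PySem.Str.slice seq (some ((s + 3*k : Nat) : Int)) (some (((s + 3*k : Nat) : Int)+3)) := by
    apply String.toList_inj.mp
    simp only [PySem.Str.toList_slice, PySem.Chars.slice_eq_listSlice, PySem.List.slice_from_natCast]
    rw [show ((3 * k : Nat) : Int) + 3 = (((3 * k : Nat) : Int) + ((3:Nat) : Int)) by push_cast; ring,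
        PySem.List.slice_natCast_add,
        show ((s + 3 * k : Nat) : Int) + 3 = (((s + 3 * k : Nat) : Int) + ((3:Nat) : Int)) by push_cast; ring,
        PySem.List.slice_natCast_add]
    rw [List.drop_drop]
  rw [hkey]

-- ===== VERDICT (by name: the statement is the Claim_ definition above) =====
theorem translate_non_stop_py_spec : Claim_equal_translate_non_stop_py := by
  intro seq gc threshold info _
  unfold Spec_translate_non_stop_py translate_non_stop_py translate_non_stop_py_alt
  simp only [List.foldl_cons, List.foldl_nil, pvModEq]
  rw [show (fun (b : List String × List String × List String) (i : Int) =>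
        let aa := PySem.Dict.getD (PySem.Dict.mk gc) (PySem.Str.slice seq (some i) (some (i + 3))) "X"
        if i % 3 == 0 then (b.1 ++ [aa], b.2.1, b.2.2)
        else if i % 3 == 1 then (b.1, b.2.1 ++ [aa], b.2.2)
        else (b.1, b.2.1, b.2.2 ++ [aa]))
      = pvStep (fun i => PySem.Dict.getD (PySem.Dict.mk gc) (PySem.Str.slice seq (some i) (some (i + 3))) "X") from rfl]
  rw [pvRoute]
  simp only [PySem.List.foldl_append_singleton_eq_map, List.nil_append]
  have h0 := pvFrame seq (PySem.Dict.mk gc) 0 (by norm_num)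
  have h1 := pvFrame seq (PySem.Dict.mk gc) 1 (by norm_num)
  have h2 := pvFrame seq (PySem.Dict.mk gc) 2 (by norm_num)
  simp only [Nat.cast_zero, Nat.cast_one, Nat.cast_ofNat] at h0 h1 h2
  rw [pvCond2, h0, h1, h2]
  simp
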